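-- pv_equiv track=rewrite | github.com/Wangxinqian/Andy-s-Learning-SpaCE | CESS7030/Simple Minesweeper Game/a1.py | number_at_cell
-- ===== SOURCE A (Python) =====
-- def replace_character_at_index(game,index,character):
--     '''uodate the game structure'''
--     game=game[:index]+str(character)+game[index+1:]
--     return game
--
-- def neighbour_directions(index, grid_size):
--     '''searching out these feasible neighbour'''
--     neighbour_perfact = [(index-grid_size)-1, index-grid_size, (index-grid_size)+1, index-1, index+1, (index+grid_size)-1, index+grid_size, (index+grid_size)+1]
--     neighbour=[]
--     gz = grid_size*grid_size-1
--     tp1 = (index//grid_size,index%grid_size)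
--     for n in neighbour_perfact:
--         tp = (n//grid_size,n%grid_size)
--         if n > gz or n < 0:
--             continue
--         if (tp[0]-tp1[0])**2+(tp[1]-tp1[1])**2>2 :
--             continue
--         neighbour.append(n)
--     return neighbour
--
-- def number_at_cell(game, pokemon_locations, grid_size, index):
--     '''the number of pokemons around the current cell'''
--     neighbour = neighbour_directions(index, grid_size)
--     count = 0
--     for n in neighbour:
--         for p in pokemon_locations:
--             if p == n:
--                 count+=1
--     replace_character_at_index(game,index,count)
--     return count
-- ===== SOURCE B (Python) =====
-- def number_at_cell(game, pokemon_locations, grid_size, index):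
--     '''the number of pokemons around the current cell'''
--     row, col = index // grid_size, index % grid_size
--     count = 0
--     for p in pokemon_locations:
--         if 0 <= p < grid_size * grid_size:
--             pr, pc = p // grid_size, p % grid_size
--             if p != index and abs(pr - row) <= 1 and abs(pc - col) <= 1:
--                 count += 1
--     return count
-- ===== Notes on version B (the rewrite author's own statement) =====
-- stated objective: alternative
-- what changed: B inverts the traversal: instead of A's building a filtered list of candidate neighbour indices and scanning pokemon_locations once per neighbour (plus a no-op replace_character_at_index call), B makes a single pass over pokemon_locations and tests each location for Chebyshev-distance-1 adjacency in 2D coordinates.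
-- intended difference: On 1x1 and 2x2 grids A's candidate list contains duplicate cells (the cell itself twice for grid_size 1 at index -1..1, the horizontal-offset neighbours twice for grid_size 2), so A double-counts pokemon at those cells; B counts each neighbouring pokemon once (and never the cell itself), which is the intended neighbour count. — e.g. on number_at_cell("", [0], 1, 0): A returns 2, B returns 0
-- outside the precondition, e.g. on number_at_cell('', [1], -2, 0): A returns 2, B returns 1; on number_at_cell('', [], 0, 0): A raises ZeroDivisionError, B raises ZeroDivisionError
import Mathlib
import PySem

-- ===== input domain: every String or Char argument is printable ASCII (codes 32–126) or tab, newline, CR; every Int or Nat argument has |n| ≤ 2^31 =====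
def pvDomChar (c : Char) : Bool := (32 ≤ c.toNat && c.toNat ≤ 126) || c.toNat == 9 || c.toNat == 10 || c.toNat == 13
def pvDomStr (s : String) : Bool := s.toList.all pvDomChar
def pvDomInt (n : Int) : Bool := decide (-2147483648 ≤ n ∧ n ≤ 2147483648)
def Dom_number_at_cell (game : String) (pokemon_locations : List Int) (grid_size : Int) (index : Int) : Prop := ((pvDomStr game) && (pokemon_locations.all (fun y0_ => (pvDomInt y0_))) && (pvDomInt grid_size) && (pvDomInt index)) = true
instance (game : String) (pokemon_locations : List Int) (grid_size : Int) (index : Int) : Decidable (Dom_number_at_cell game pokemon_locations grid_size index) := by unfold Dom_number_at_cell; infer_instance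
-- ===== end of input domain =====

-- B inverts the traversal: a single pass over pokemon_locations testing each location for
-- Chebyshev-distance-1 adjacency in 2D, instead of A's candidate-neighbour list with its
-- Euclidean wraparound filter and per-neighbour scan (and a no-op string-rebuild call);
-- on 1x1/2x2 grids A double-counts some cells (see D_ below), B returns the intended count.

-- ===== PORT A =====
def replace_character_at_index (game : String) (index : Int) (character : Int) : String :=
  let game := PySem.Str.slice game none (some index) ++ PySem.Int.toStr character ++ PySem.Str.slice game (some (index+1)) none
  game

def neighbour_directions (index : Int) (grid_size : Int) : List Int :=
  let neighbour_perfact : List Int := [(index-grid_size)-1, index-grid_size, (index-grid_size)+1, index-1, index+1, (index+grid_size)-1, index+grid_size, (index+grid_size)+1]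
  let gz := grid_size*grid_size-1
  let tp1 := (PySem.Int.floordiv index grid_size, PySem.Int.mod index grid_size)
  neighbour_perfact.foldl (fun neighbour n =>
    let tp := (PySem.Int.floordiv n grid_size, PySem.Int.mod n grid_size)
    if n > gz ∨ n < 0 then neighbour
    else if (tp.1 - tp1.1)^2 + (tp.2 - tp1.2)^2 > 2 then neighbour
    else neighbour ++ [n]) []

def number_at_cell (game : String) (pokemon_locations : List Int) (grid_size : Int) (index : Int) : Int :=
  let neighbour := neighbour_directions index grid_size
  let count := neighbour.foldl (fun count n =>
    pokemon_locations.foldl (fun count p => if p = n then count + 1 else count) count) 0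
  let _ := replace_character_at_index game index count
  count

-- ===== PORT B =====
def number_at_cell_alt (game : String) (pokemon_locations : List Int) (grid_size : Int) (index : Int) : Int :=
  let row := PySem.Int.floordiv index grid_size
  let col := PySem.Int.mod index grid_size
  pokemon_locations.foldl (fun count p =>
    if 0 ≤ p ∧ p < grid_size * grid_size then
      let pr := PySem.Int.floordiv p grid_size
      let pc := PySem.Int.mod p grid_size
      if p ≠ index ∧ |pr - row| ≤ 1 ∧ |pc - col| ≤ 1 then count + 1 else count
    else count) 0

-- ===== PRECONDITION & SPEC =====
-- Pre_ excludes grid_size ≤ 0: at grid_size = 0 A raises ZeroDivisionError, and a negative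
-- grid_size is outside the game's natural domain (A's floor-division row/col pairs there
-- produce an accidental neighbour set).
def Pre_number_at_cell (game : String) (pokemon_locations : List Int) (grid_size : Int) (index : Int) : Prop := 1 ≤ grid_size
instance (game : String) (pokemon_locations : List Int) (grid_size : Int) (index : Int) : Decidable (Pre_number_at_cell game pokemon_locations grid_size index) := by unfold Pre_number_at_cell; infer_instance
def pvWitness_number_at_cell : String × List Int × Int × Int := ("", [0, 4], 3, 4)

-- On 1x1 and 2x2 grids A's candidate list contains duplicate cells (the cell itself twice for
-- grid_size 1 at index -1..1, the horizontal-offset neighbours twice for grid_size 2), so A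
-- double-counts pokemon at those cells; B counts each neighbouring pokemon once (and never
-- the cell itself), which is the intended neighbour count.
def D_number_at_cell (game : String) (pokemon_locations : List Int) (grid_size : Int) (index : Int) : Prop :=
  1 ≤ grid_size ∧ grid_size ≤ 2 ∧ ∃ j ∈ pokemon_locations,
    0 ≤ j ∧ j < grid_size * grid_size ∧ index - 1 ≤ j ∧ j ≤ index + 1 ∧ (grid_size = 1 ∨ j ≠ index)
instance (game : String) (pokemon_locations : List Int) (grid_size : Int) (index : Int) : Decidable (D_number_at_cell game pokemon_locations grid_size index) := by unfold D_number_at_cell; infer_instance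

def Spec_number_at_cell (game : String) (pokemon_locations : List Int) (grid_size : Int) (index : Int) (out : Int) : Prop := ¬ D_number_at_cell game pokemon_locations grid_size index → out = number_at_cell_alt game pokemon_locations grid_size index
instance (game : String) (pokemon_locations : List Int) (grid_size : Int) (index : Int) (out : Int) : Decidable (Spec_number_at_cell game pokemon_locations grid_size index out) := by unfold Spec_number_at_cell; infer_instance

def pvDiffWitness_number_at_cell : String × List Int × Int × Int := ("", [0], 1, 0)
def pvDiffWitnessOut_number_at_cell : Int × Int := (2, 0)

-- ===== CLAIM (what is proved, stated in full; the proofs are below) =====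
def Claim_unchanged_number_at_cell : Prop := ∀ (game : String) (pokemon_locations : List Int) (grid_size : Int) (index : Int), Dom_number_at_cell game pokemon_locations grid_size index → Pre_number_at_cell game pokemon_locations grid_size index → Spec_number_at_cell game pokemon_locations grid_size index (number_at_cell game pokemon_locations grid_size index)
def Claim_changed_number_at_cell : Prop := Dom_number_at_cell (pvDiffWitness_number_at_cell.1) (pvDiffWitness_number_at_cell.2.1) (pvDiffWitness_number_at_cell.2.2.1) (pvDiffWitness_number_at_cell.2.2.2) ∧ Pre_number_at_cell (pvDiffWitness_number_at_cell.1) (pvDiffWitness_number_at_cell.2.1) (pvDiffWitness_number_at_cell.2.2.1) (pvDiffWitness_number_at_cell.2.2.2) ∧ D_number_at_cell (pvDiffWitness_number_at_cell.1) (pvDiffWitness_number_at_cell.2.1) (pvDiffWitness_number_at_cell.2.2.1) (pvDiffWitness_number_at_cell.2.2.2) ∧ number_at_cell (pvDiffWitness_number_at_cell.1) (pvDiffWitness_number_at_cell.2.1) (pvDiffWitness_number_at_cell.2.2.1) (pvDiffWitness_number_at_cell.2.2.2) = pvDiffWitnessOut_number_at_cell.1 ∧ number_at_cell_alt (pvDiffWitness_number_at_cell.1)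 (pvDiffWitness_number_at_cell.2.1) (pvDiffWitness_number_at_cell.2.2.1) (pvDiffWitness_number_at_cell.2.2.2) = pvDiffWitnessOut_number_at_cell.2 ∧ pvDiffWitnessOut_number_at_cell.1 ≠ pvDiffWitnessOut_number_at_cell.2
def Claim_exact_number_at_cell : Prop := ∀ (game : String) (pokemon_locations : List Int) (grid_size : Int) (index : Int), Dom_number_at_cell game pokemon_locations grid_size index → Pre_number_at_cell game pokemon_locations grid_size index → D_number_at_cell game pokemon_locations grid_size index → number_at_cell game pokemon_locations grid_size index ≠ number_at_cell_alt game pokemon_locations grid_size index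

-- ===== LEMMAS AND PROOFS =====

-- A's per-candidate acceptance condition (after floordiv/mod → ediv/emod for positive grid).
@[reducible] def Acond (g i n : Int) : Prop :=
  ¬(n > g*g - 1 ∨ n < 0) ∧ ¬((n/g - i/g)^2 + (n%g - i%g)^2 > 2)

-- A's contribution of one candidate cell n / the contribution of the in-bounds cell at offset (dr, dc).
def At (locs : List Int) (g i n : Int) : Int := if Acond g i n then (List.count n locs : Int) else 0

def Bt (locs : List Int) (g i dr dc : Int) : Int :=
  if 0 ≤ i/g + dr ∧ i/g + dr < g ∧ 0 ≤ i%g + dc ∧ i%g + dc < g then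
    (List.count ((i/g + dr) * g + (i%g + dc)) locs : Int) else 0

-- B's per-location indicator (after floordiv/mod → ediv/emod).
def BindB (g i p : Int) : Int :=
  if 0 ≤ p ∧ p < g * g then
    (if p ≠ i ∧ |p/g - i/g| ≤ 1 ∧ |p%g - i%g| ≤ 1 then 1 else 0)
  else 0

lemma inner_fold (locs : List Int) (n c : Int) :
    locs.foldl (fun c p => if p = n then c + 1 else c) c = c + (List.count n locs : Int) := by
  induction locs generalizing c with
  | nil => simp
  | cons p l ih =>
    by_cases h : p = n <;> simp [List.foldl_cons, ih, h] <;> push_cast <;> ring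

lemma outer_fold (locs : List Int) (l : List Int) (c : Int) :
    l.foldl (fun c n => locs.foldl (fun c p => if p = n then c + 1 else c) c) c
      = c + (l.map (fun n => (List.count n locs : Int))).sum := by
  induction l generalizing c with
  | nil => simp
  | cons n l ih =>
    rw [List.foldl_cons, ih]
    simp only [List.map_cons, List.sum_cons]
    rw [inner_fold]
    ring

lemma sum_map_filter_cons (p : Int → Bool) (f : Int → Int) (a : Int) (l : List Int) :
    (((a :: l).filter p).map f).sum = (if p a then f a else 0) + ((l.filter p).map f).sum := by
  by_cases h : p a <;> simp [List.filter_cons, h]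

lemma nd_eq (g i : Int) (hg : 0 < g) :
    neighbour_directions i g = ([(i-g)-1, i-g, (i-g)+1, i-1, i+1, (i+g)-1, i+g, (i+g)+1] : List Int).filter (fun n => decide (Acond g i n)) := by
  unfold neighbour_directions
  simp only [PySem.Int.floordiv_eq_ediv_of_pos hg, PySem.Int.mod_eq_emod_of_pos hg]
  rw [show (fun (neighbour : List Int) (n : Int) =>
        if n > g*g-1 ∨ n < 0 then neighbour
        else if (n/g - i/g)^2 + (n%g - i%g)^2 > 2 then neighbour
        else neighbour ++ [n])
      = (fun neighbour n => if Acond g i n then neighbour ++ [n] else neighbour) from ?_]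
  · rw [PySem.List.foldl_append_ite_eq_filter]
    simp
  · funext nb n
    unfold Acond
    split_ifs <;> first | rfl | tauto

lemma A_eq (game : String) (locs : List Int) (g i : Int) (hg : 0 < g) :
    number_at_cell game locs g i =
      At locs g i (i-g-1) + At locs g i (i-g) + At locs g i (i-g+1) + At locs g i (i-1) +
      At locs g i (i+1) + At locs g i (i+g-1) + At locs g i (i+g) + At locs g i (i+g+1) := by
  show (neighbour_directions i g).foldl _ 0 = _
  rw [nd_eq g i hg, outer_fold]
  simp only [sum_map_filter_cons, List.filter_nil, List.map_nil, List.sum_nil, add_zero,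
    decide_eq_true_eq]
  unfold At
  ring_nf

lemma divmod_of (g q s : Int) (hg : 0 < g) (h0 : 0 ≤ s) (h1 : s < g) :
    (q*g + s)/g = q ∧ (q*g + s)%g = s := by
  constructor
  · rw [add_comm, Int.add_mul_ediv_right _ _ (by omega : g ≠ 0), Int.ediv_eq_zero_of_lt h0 h1]
    omega
  · rw [add_comm, mul_comm, Int.add_mul_emod_self_left, Int.emod_eq_of_lt h0 h1]

-- B's fold accumulates the sum of the per-location indicators.
lemma new_fold (g i : Int) (locs : List Int) (c : Int) :
    locs.foldl (fun count p =>
      if 0 ≤ p ∧ p < g * g then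
        (if p ≠ i ∧ |p/g - i/g| ≤ 1 ∧ |p%g - i%g| ≤ 1 then count + 1 else count)
      else count) c
    = c + (locs.map (BindB g i)).sum := by
  induction locs generalizing c with
  | nil => simp
  | cons p l ih =>
    simp only [List.foldl_cons, List.map_cons, List.sum_cons]
    have hhead : (if 0 ≤ p ∧ p < g * g then
        (if p ≠ i ∧ |p/g - i/g| ≤ 1 ∧ |p%g - i%g| ≤ 1 then c + 1 else c)
      else c) = c + BindB g i p := by
      unfold BindB; split_ifs <;> ring
    rw [hhead, ih]
    ring

-- One offset term of the Bt-sum, rewritten as an exact-coordinate-match indicator on p.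
lemma offset_term (g i p dr dc : Int) (hg : 0 < g) (hne : ¬(dr = 0 ∧ dc = 0)) :
    (if (0 ≤ i/g + dr ∧ i/g + dr < g ∧ 0 ≤ i%g + dc ∧ i%g + dc < g) ∧ p = (i/g + dr) * g + (i%g + dc)
      then (1:Int) else 0)
    = if (0 ≤ p ∧ p < g*g ∧ p ≠ i) ∧ p/g - i/g = dr ∧ p%g - i%g = dc then 1 else 0 := by
  have hi : g * (i / g) + i % g = i := Int.ediv_add_emod i g
  apply if_congr _ rfl rfl
  constructor
  · rintro ⟨⟨h1, h2, h3, h4⟩, hcell⟩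
    obtain ⟨hdiv, hmod⟩ := divmod_of g (i/g + dr) (i%g + dc) hg h3 h4
    rw [← hcell] at hdiv hmod
    have hp0 : 0 ≤ p := by rw [hcell]; nlinarith
    have hp1 : p < g*g := by rw [hcell]; nlinarith
    have hpi : p ≠ i := by
      intro h
      rw [h] at hdiv hmod
      exact hne ⟨by omega, by omega⟩
    exact ⟨⟨hp0, hp1, hpi⟩, by omega, by omega⟩
  · rintro ⟨⟨hp0, hp1, hpi⟩, ha, hb⟩
    have hdiv : p/g = i/g + dr := by omega
    have hmod : p%g = i%g + dc := by omega
    have hm0 : 0 ≤ p % g := Int.emod_nonneg p (by omega)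
    have hm1 : p % g < g := Int.emod_lt_of_pos p hg
    have hd0 : 0 ≤ p / g := Int.ediv_nonneg hp0 (by omega)
    have hd1 : p / g < g := by
      by_contra hc
      push_neg at hc
      have := Int.ediv_add_emod p g
      nlinarith
    refine ⟨⟨by omega, by omega, by omega, by omega⟩, ?_⟩
    rw [← hdiv, ← hmod]
    have := Int.ediv_add_emod p g
    linarith

-- The per-location indicator equals the sum of the 8 exact-match indicators.
set_option maxHeartbeats 2000000 in
lemma key (g i p : Int) (hg : 0 < g) :
    BindB g i p =
      (if (0 ≤ i/g + -1 ∧ i/g + -1 < g ∧ 0 ≤ i%g + -1 ∧ i%g + -1 < g) ∧ p = (i/g + -1) * g + (i%g + -1) then (1:Int) else 0)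
    + (if (0 ≤ i/g + -1 ∧ i/g + -1 < g ∧ 0 ≤ i%g + 0 ∧ i%g + 0 < g) ∧ p = (i/g + -1) * g + (i%g + 0) then 1 else 0)
    + (if (0 ≤ i/g + -1 ∧ i/g + -1 < g ∧ 0 ≤ i%g + 1 ∧ i%g + 1 < g) ∧ p = (i/g + -1) * g + (i%g + 1) then 1 else 0)
    + (if (0 ≤ i/g + 0 ∧ i/g + 0 < g ∧ 0 ≤ i%g + -1 ∧ i%g + -1 < g) ∧ p = (i/g + 0) * g + (i%g + -1) then 1 else 0)
    + (if (0 ≤ i/g + 0 ∧ i/g + 0 < g ∧ 0 ≤ i%g + 1 ∧ i%g + 1 < g) ∧ p = (i/g + 0) * g + (i%g + 1) then 1 else 0)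
    + (if (0 ≤ i/g + 1 ∧ i/g + 1 < g ∧ 0 ≤ i%g + -1 ∧ i%g + -1 < g) ∧ p = (i/g + 1) * g + (i%g + -1) then 1 else 0)
    + (if (0 ≤ i/g + 1 ∧ i/g + 1 < g ∧ 0 ≤ i%g + 0 ∧ i%g + 0 < g) ∧ p = (i/g + 1) * g + (i%g + 0) then 1 else 0)
    + (if (0 ≤ i/g + 1 ∧ i/g + 1 < g ∧ 0 ≤ i%g + 1 ∧ i%g + 1 < g) ∧ p = (i/g + 1) * g + (i%g + 1) then 1 else 0) := by
  rw [offset_term g i p (-1) (-1) hg (by omega), offset_term g i p (-1) 0 hg (by omega),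
      offset_term g i p (-1) 1 hg (by omega), offset_term g i p 0 (-1) hg (by omega),
      offset_term g i p 0 1 hg (by omega), offset_term g i p 1 (-1) hg (by omega),
      offset_term g i p 1 0 hg (by omega), offset_term g i p 1 1 hg (by omega)]
  have hiff : (p = i) ↔ (p/g - i/g = 0 ∧ p%g - i%g = 0) := by
    constructor
    · rintro rfl; omega
    · rintro ⟨ha, hb⟩
      have h1 := Int.ediv_add_emod p g
      have h2 := Int.ediv_add_emod i g
      nlinarith
  unfold BindB
  simp only [abs_le, ne_eq, hiff]
  generalize p/g - i/g = a
  generalize p%g - i%g = b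
  generalize g*g = G
  split_ifs <;> omega

lemma Bt_cons (p : Int) (locs : List Int) (g i dr dc : Int) :
    Bt (p :: locs) g i dr dc =
      (if (0 ≤ i/g + dr ∧ i/g + dr < g ∧ 0 ≤ i%g + dc ∧ i%g + dc < g) ∧ p = (i/g + dr) * g + (i%g + dc)
        then (1:Int) else 0) + Bt locs g i dr dc := by
  unfold Bt
  by_cases hb : 0 ≤ i/g + dr ∧ i/g + dr < g ∧ 0 ≤ i%g + dc ∧ i%g + dc < g
  · simp only [hb, if_pos, true_and]
    by_cases hp : p = (i/g + dr) * g + (i%g + dc)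
    · rw [if_pos hp]
      subst hp
      simp [List.count_cons]
      push_cast
      ring
    · rw [if_neg hp]
      have : ((i/g + dr) * g + (i%g + dc)) ≠ p := Ne.symm hp
      simp [List.count_cons, this]
      exact hp
  · simp [hb]

lemma sum_Bind (locs : List Int) (g i : Int) (hg : 0 < g) :
    (locs.map (BindB g i)).sum =
      Bt locs g i (-1) (-1) + Bt locs g i (-1) 0 + Bt locs g i (-1) 1 + Bt locs g i 0 (-1) +
      Bt locs g i 0 1 + Bt locs g i 1 (-1) + Bt locs g i 1 0 + Bt locs g i 1 1 := by
  induction locs with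
  | nil => simp [Bt]
  | cons p l ih =>
    rw [List.map_cons, List.sum_cons, ih, key g i p hg]
    simp only [Bt_cons]
    ring

lemma B_eq (game : String) (locs : List Int) (g i : Int) (hg : 0 < g) :
    number_at_cell_alt game locs g i =
      Bt locs g i (-1) (-1) + Bt locs g i (-1) 0 + Bt locs g i (-1) 1 + Bt locs g i 0 (-1) +
      Bt locs g i 0 1 + Bt locs g i 1 (-1) + Bt locs g i 1 0 + Bt locs g i 1 1 := by
  unfold number_at_cell_alt
  simp only [PySem.Int.floordiv_eq_ediv_of_pos hg, PySem.Int.mod_eq_emod_of_pos hg]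
  rw [new_fold g i locs 0, sum_Bind locs g i hg]
  ring

lemma range_iff (g q c : Int) (hg : 0 < g) (h0 : 0 ≤ c) (h1 : c < g) :
    (0 ≤ q*g + c ∧ q*g + c ≤ g*g - 1) ↔ (0 ≤ q ∧ q < g) := by
  constructor
  · rintro ⟨ha, hb⟩
    constructor
    · by_contra hq; push_neg at hq; nlinarith
    · by_contra hq; push_neg at hq; nlinarith
  · rintro ⟨ha, hb⟩
    exact ⟨by nlinarith, by nlinarith⟩

lemma Bt_false (locs : List Int) (g i dr dc : Int)
    (h : ¬(0 ≤ i/g + dr ∧ i/g + dr < g ∧ 0 ≤ i%g + dc ∧ i%g + dc < g)) :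
    Bt locs g i dr dc = 0 := by
  unfold Bt; rw [if_neg (by tauto)]

lemma At_false (locs : List Int) (g i n : Int) (h : ¬ Acond g i n) :
    At locs g i n = 0 := by
  unfold At; rw [if_neg h]

-- On a grid of side ≥ 3, A's candidate filter accepts exactly the cells the bounds accept.
lemma term_eq (locs : List Int) (g i n dr dc : Int) (hg : 3 ≤ g)
    (hn : n = i + dr*g + dc)
    (hdr : dr = -1 ∨ dr = 0 ∨ dr = 1) (hdc : dc = -1 ∨ dc = 0 ∨ dc = 1) :
    At locs g i n = Bt locs g i dr dc := by
  have hg0 : (0:Int) < g := by omega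
  have hc0 : 0 ≤ i % g := Int.emod_nonneg i (by omega)
  have hc1 : i % g < g := Int.emod_lt_of_pos i hg0
  have hi : g * (i / g) + i % g = i := Int.ediv_add_emod i g
  have main : 0 ≤ i % g + dc → i % g + dc < g → At locs g i n = Bt locs g i dr dc := by
    intro h0' h1'
    have hshape : n = (i/g + dr)*g + (i%g + dc) := by rw [hn]; linear_combination -hi
    obtain ⟨hdiv, hmod⟩ := divmod_of g (i/g + dr) (i%g + dc) hg0 h0' h1'
    rw [← hshape] at hdiv hmod
    have hiff : Acond g i n ↔ (0 ≤ i/g + dr ∧ i/g + dr < g ∧ 0 ≤ i%g + dc ∧ i%g + dc < g) := by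
      unfold Acond
      constructor
      · rintro ⟨hA, -⟩
        push_neg at hA
        have hr := (range_iff g (i/g + dr) (i%g + dc) hg0 h0' h1').mp
          ⟨by rw [← hshape]; omega, by rw [← hshape]; omega⟩
        exact ⟨hr.1, hr.2, h0', h1'⟩
      · rintro ⟨hq0, hq1, -, -⟩
        have hr := (range_iff g (i/g + dr) (i%g + dc) hg0 h0' h1').mpr ⟨hq0, hq1⟩
        refine ⟨by rw [hshape]; omega, ?_⟩
        rw [hdiv, hmod]
        have hd : (i/g + dr - i/g)^2 + (i%g + dc - i%g)^2 = dr^2 + dc^2 := by ring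
        have hsq : dr^2 + dc^2 ≤ 2 := by
          rcases hdr with h|h|h <;> rcases hdc with hh|hh|hh <;> subst h <;> subst hh <;> norm_num
        omega
    unfold At Bt
    rw [if_congr hiff (by rw [hshape]) rfl]
  rcases hdc with h|h|h
  · subst h
    by_cases hcz : i % g = 0
    · -- wrapped to the previous row: A's distance filter rejects it, B's column bound too
      have hshape : n = (i/g + dr - 1)*g + (g - 1) := by rw [hn]; linear_combination -hi + hcz
      obtain ⟨hdiv, hmod⟩ := divmod_of g (i/g + dr - 1) (g - 1) hg0 (by omega) (by omega)
      rw [← hshape] at hdiv hmod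
      rw [At_false, Bt_false]
      · omega
      · unfold Acond
        rintro ⟨-, hd⟩
        apply hd
        rw [hdiv, hmod, hcz]
        nlinarith [sq_nonneg (i/g + dr - 1 - i/g)]
    · exact main (by omega) (by omega)
  · subst h; exact main (by omega) (by omega)
  · subst h
    by_cases hcz : i % g = g - 1
    · have hshape : n = (i/g + dr + 1)*g + 0 := by rw [hn]; linear_combination -hi + hcz
      obtain ⟨hdiv, hmod⟩ := divmod_of g (i/g + dr + 1) 0 hg0 (by omega) (by omega)
      rw [← hshape] at hdiv hmod
      rw [At_false, Bt_false]
      · omega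
      · unfold Acond
        rintro ⟨-, hd⟩
        apply hd
        rw [hdiv, hmod, hcz]
        nlinarith [sq_nonneg (i/g + dr + 1 - i/g)]
    · exact main (by omega) (by omega)

lemma Acond_bounds {g i n : Int} (h : Acond g i n) :
    0 ≤ n ∧ n ≤ g*g - 1 ∧ -1 ≤ n/g - i/g ∧ n/g - i/g ≤ 1 ∧ -1 ≤ n%g - i%g ∧ n%g - i%g ≤ 1 := by
  obtain ⟨h1, h2⟩ := h
  push_neg at h1 h2
  refine ⟨by omega, by omega, ?_, ?_, ?_, ?_⟩ <;>
    nlinarith [sq_nonneg (n/g - i/g), sq_nonneg (n%g - i%g)]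

-- ===== VERDICT (by name: the statement is the Claim_ definition above) =====
theorem number_at_cell_spec : Claim_unchanged_number_at_cell := by
  intro game locs g i _ hpre hD
  have hg1 : (1:Int) ≤ g := hpre
  have hg0 : (0:Int) < g := by omega
  show number_at_cell game locs g i = number_at_cell_alt game locs g i
  rw [A_eq game locs g i hg0, B_eq game locs g i hg0]
  by_cases h3 : 3 ≤ g
  · rw [term_eq locs g i _ (-1) (-1) h3 (by ring) (by norm_num) (by norm_num),
        term_eq locs g i _ (-1) 0 h3 (by ring) (by norm_num) (by norm_num),
        term_eq locs g i _ (-1) 1 h3 (by ring) (by norm_num) (by norm_num),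
        term_eq locs g i _ 0 (-1) h3 (by ring) (by norm_num) (by norm_num),
        term_eq locs g i _ 0 1 h3 (by ring) (by norm_num) (by norm_num),
        term_eq locs g i _ 1 (-1) h3 (by ring) (by norm_num) (by norm_num),
        term_eq locs g i _ 1 0 h3 (by ring) (by norm_num) (by norm_num),
        term_eq locs g i _ 1 1 h3 (by ring) (by norm_num) (by norm_num)]
  · have hg2 : g ≤ 2 := by omega
    interval_cases g
    · -- grid_size = 1
      by_cases hi : -1 ≤ i ∧ i ≤ 1
      · obtain ⟨hl, hr⟩ := hi
        have hD' : (0:Int) ∉ locs := fun hmem =>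
          hD ⟨by norm_num, by norm_num, 0, hmem, by norm_num, by norm_num, by omega, by omega,
            Or.inl rfl⟩
        have hcz : List.count (0:Int) locs = 0 := List.count_eq_zero.mpr hD'
        interval_cases i <;> norm_num [At, Bt, Acond] <;> simp [hcz]
      · have hAz : ∀ n, At locs 1 i n = 0 := fun n =>
          At_false _ _ _ _ (fun hA => by have := Acond_bounds hA; omega)
        have hBz : ∀ dr dc : Int, dr = -1 ∨ dr = 0 ∨ dr = 1 → Bt locs 1 i dr dc = 0 := by
          intro dr dc hdr
          apply Bt_false
          rintro ⟨a, b, -, -⟩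
          rcases hdr with h|h|h <;> subst h <;> omega
        simp [hAz, hBz _ _ (by norm_num : (-1:Int) = -1 ∨ (-1:Int) = 0 ∨ (-1:Int) = 1),
          hBz _ _ (by norm_num : (0:Int) = -1 ∨ (0:Int) = 0 ∨ (0:Int) = 1),
          hBz _ _ (by norm_num : (1:Int) = -1 ∨ (1:Int) = 0 ∨ (1:Int) = 1)]
    · -- grid_size = 2
      by_cases hi : -2 ≤ i ∧ i ≤ 6
      · obtain ⟨hl, hr⟩ := hi
        have hnm : ∀ j : Int, 0 ≤ j → j < 4 → i - 1 ≤ j → j ≤ i + 1 → j ≠ i → j ∉ locs :=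
          fun j a b c d e hj =>
            hD ⟨by norm_num, by norm_num, j, hj, a, by omega, c, d, Or.inr e⟩
        interval_cases i <;>
          norm_num [At, Bt, Acond] <;>
        · try have z0 : List.count (0:Int) locs = 0 :=
            List.count_eq_zero.mpr (hnm 0 (by norm_num) (by norm_num) (by omega) (by omega) (by omega))
          try have z1 : List.count (1:Int) locs = 0 :=
            List.count_eq_zero.mpr (hnm 1 (by norm_num) (by norm_num) (by omega) (by omega) (by omega))
          try have z2 : List.count (2:Int) locs = 0 :=
            List.count_eq_zero.mpr (hnm 2 (by norm_num) (by norm_num) (by omega) (by omega) (by omega))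
          try have z3 : List.count (3:Int) locs = 0 :=
            List.count_eq_zero.mpr (hnm 3 (by norm_num) (by norm_num) (by omega) (by omega) (by omega))
          omega
      · have hAz : ∀ n, At locs 2 i n = 0 := fun n =>
          At_false _ _ _ _ (fun hA => by have := Acond_bounds hA; omega)
        have hBz : ∀ dr dc : Int, dr = -1 ∨ dr = 0 ∨ dr = 1 → Bt locs 2 i dr dc = 0 := by
          intro dr dc hdr
          apply Bt_false
          rintro ⟨a, b, -, -⟩
          rcases hdr with h|h|h <;> subst h <;> omega
        simp [hAz, hBz _ _ (by norm_num : (-1:Int) = -1 ∨ (-1:Int) = 0 ∨ (-1:Int) = 1),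
          hBz _ _ (by norm_num : (0:Int) = -1 ∨ (0:Int) = 0 ∨ (0:Int) = 1),
          hBz _ _ (by norm_num : (1:Int) = -1 ∨ (1:Int) = 0 ∨ (1:Int) = 1)]

theorem number_at_cell_changed : Claim_changed_number_at_cell := by
  unfold Claim_changed_number_at_cell; decide

theorem number_at_cell_tight : Claim_exact_number_at_cell := by
  intro game locs g i _ hpre hD
  obtain ⟨hg1, hg2, j, hj, hj0, hjlt, hjl, hjr, hor⟩ := hD
  interval_cases g
  · -- grid_size = 1: the only duplicated cell is 0, the cell itself
    have hjz : j = 0 := by omega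
    subst hjz
    have hc : 0 < List.count (0:Int) locs := List.count_pos_iff.mpr hj
    have hl : -1 ≤ i := by omega
    have hr : i ≤ 1 := by omega
    rw [A_eq game locs 1 i one_pos, B_eq game locs 1 i one_pos]
    interval_cases i <;> norm_num [At, Bt, Acond] <;> omega
  · -- grid_size = 2: the duplicated cells are index ± 1 inside the grid
    have hne : j ≠ i := by
      rcases hor with h | h
      · exact absurd h (by norm_num)
      · exact h
    have hl : -1 ≤ i := by omega
    have hr : i ≤ 4 := by omega
    rw [A_eq game locs 2 i (by norm_num), B_eq game locs 2 i (by norm_num)]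
    interval_cases i <;>
    · norm_num [At, Bt, Acond]
      have hj4 : j = 0 ∨ j = 1 ∨ j = 2 ∨ j = 3 := by omega
      rcases hj4 with h|h|h|h <;> subst h <;>
        (have hc := List.count_pos_iff.mpr hj; omega)
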